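-- pv_equiv track=rewrite | github.com/SuhaniA112/myschoolscheduling | app.py | get_course_name
-- ===== SOURCE A (Python) =====
-- def get_course_name(course):
--     course_name = ""
--     for word in course["name"].split():
--         if word == "AP":
--             course_name += "AP"
--         elif "." in word:
--             course_name += " " + word[0].upper()
--             for letter in range(1, len(word)):
--                 if word[letter - 1] == ".":
--                     course_name += word[letter].upper()
--                 else:
--                     course_name += word[letter].lower()
--         else:
--             course_name += " " + word[0].upper() + word[1:].lower()
--     return course_name
-- ===== SOURCE B (Python) =====
-- def get_course_name(course):
--     parts = []
--     for word in course["name"].split():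
--         if word == "AP":
--             parts.append("AP")
--         else:
--             out = []
--             cap = True
--             for ch in word:
--                 out.append(ch.upper() if cap else ch.lower())
--                 cap = ch == "."
--             parts.append(" " + "".join(out))
--     return "".join(parts)
-- ===== Notes on version B (the rewrite author's own statement) =====
-- stated objective: simpler
-- what changed: A's three formatting branches (AP, dotted word via an index-lookback character loop, plain word via slicing) are replaced by one uniform capitalise-after-dot state machine over each word's characters, with pieces collected in a list and joined once.
import Mathlib
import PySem

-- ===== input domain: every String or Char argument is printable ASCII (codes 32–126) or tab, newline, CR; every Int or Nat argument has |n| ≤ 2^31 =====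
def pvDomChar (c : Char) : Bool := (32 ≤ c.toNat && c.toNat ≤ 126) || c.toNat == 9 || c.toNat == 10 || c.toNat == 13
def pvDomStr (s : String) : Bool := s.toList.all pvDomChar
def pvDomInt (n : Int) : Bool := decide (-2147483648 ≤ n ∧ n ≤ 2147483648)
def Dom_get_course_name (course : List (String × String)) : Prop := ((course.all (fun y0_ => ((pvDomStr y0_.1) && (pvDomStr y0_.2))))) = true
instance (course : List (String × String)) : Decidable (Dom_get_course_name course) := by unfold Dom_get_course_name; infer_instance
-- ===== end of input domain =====

-- B replaces A's three formatting branches (AP / dotted word with an index-lookback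
-- character loop / plain word) by a single uniform capitalise-after-dot state machine
-- over each word's characters, accumulating the pieces in a list that is joined once
-- (objective: simpler).

-- ===== PORT A =====
-- inner loop 'for letter in range(1, len(word))' of A's dotted branch; the indices
-- letter and letter-1 are always in range, so the default of pyGetD is never used
def get_course_name_dotLoop (word : List Char) : List Char :=
  (PySem.List.pyRange 1 (word.length : Int)).foldl
    (fun acc letter =>
      if PySem.List.pyGetD word (letter - 1) ' ' = '.' then
        acc ++ [PySem.Chars.upperChar (PySem.List.pyGetD word letter ' ')]
      else
        acc ++ [PySem.Chars.lowerChar (PySem.List.pyGetD word letter ' ')]) []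

-- literal port of A; word[0] is ported as headD (split₀ produces no empty word),
-- word[1:] as drop 1 (a nonnegative slice)
def get_course_name (course : List (String × String)) : String :=
  String.ofList ((PySem.Chars.split₀ ((PySem.Dict.get? (PySem.Dict.mk course) "name").getD "").toList).foldl
    (fun course_name word =>
      if word = ['A', 'P'] then
        course_name ++ ['A', 'P']
      else if '.' ∈ word then
        course_name ++ [' '] ++ [PySem.Chars.upperChar (word.headD ' ')]
          ++ get_course_name_dotLoop word
      else
        course_name ++ [' '] ++ [PySem.Chars.upperChar (word.headD ' ')]
          ++ PySem.Chars.lower (word.drop 1)) [])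

-- ===== PORT B =====
-- B's character state machine: cap says whether the next character is uppercased;
-- it is re-armed exactly after a '.'
def get_course_name_go : Bool → List Char → List Char
  | _, [] => []
  | cap, c :: rest =>
      (if cap then PySem.Chars.upperChar c else PySem.Chars.lowerChar c)
        :: get_course_name_go (c == '.') rest

def get_course_name_word (w : List Char) : List Char :=
  if w = ['A', 'P'] then ['A', 'P'] else ' ' :: get_course_name_go true w

def get_course_name_alt (course : List (String × String)) : String :=
  String.ofList (PySem.Chars.join []
    ((PySem.Chars.split₀ ((PySem.Dict.get? (PySem.Dict.mk course) "name").getD "").toList).map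
      get_course_name_word))

-- ===== PRECONDITION & SPEC =====
-- Pre_ excludes exactly the dicts with no "name" key, on which the Python A raises KeyError
def Pre_get_course_name (course : List (String × String)) : Prop :=
  "name" ∈ course.map Prod.fst
instance (course : List (String × String)) : Decidable (Pre_get_course_name course) := by
  unfold Pre_get_course_name; infer_instance
def pvWitness_get_course_name : (List (String × String)) := [("name", "AP u.s. history")]

def Spec_get_course_name (course : List (String × String)) (out : String) : Prop := out = get_course_name_alt course
instance (course : List (String × String)) (out : String) : Decidable (Spec_get_course_name course out) := by unfold Spec_get_course_name; infer_instance

-- ===== CLAIM (what is proved, stated in full; the proofs are below) =====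
def Claim_equal_get_course_name : Prop := ∀ (course : List (String × String)), Dom_get_course_name course → Pre_get_course_name course → Spec_get_course_name course (get_course_name course)

-- ===== LEMMAS AND PROOFS =====

-- every word produced by split₀ is nonempty (invariant of split₀.go)
lemma split₀_go_ne_nil (s : List Char) : ∀ (cur : List Char) (acc : List (List Char)),
    (∀ u ∈ acc, u ≠ []) → ∀ w ∈ PySem.Chars.split₀.go s cur acc, w ≠ [] := by
  induction s with
  | nil =>
      intro cur acc hacc w hw
      simp only [PySem.Chars.split₀.go] at hw
      split at hw
      · exact hacc w (by simpa using hw)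
      · rename_i hcur
        simp only [List.mem_reverse, List.mem_cons] at hw
        rcases hw with h | h
        · subst h; simpa [List.isEmpty_iff] using hcur
        · exact hacc w h
  | cons c rest ih =>
      intro cur acc hacc w hw
      simp only [PySem.Chars.split₀.go] at hw
      split at hw
      · split at hw
        · exact ih [] acc hacc w hw
        · rename_i hcur
          refine ih [] _ ?_ w hw
          intro u hu
          rcases List.mem_cons.mp hu with h | h
          · subst h; simpa [List.isEmpty_iff] using hcur
          · exact hacc u h
      · exact ih (c :: cur) acc hacc w hw

lemma split₀_ne_nil {s w : List Char} (hw : w ∈ PySem.Chars.split₀ s) : w ≠ [] :=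
  split₀_go_ne_nil s [] [] (by simp) w hw

-- pair formatter both word-level characterisations reduce to
def pvPairF (pc : Char × Char) : Char :=
  if pc.1 = '.' then PySem.Chars.upperChar pc.2 else PySem.Chars.lowerChar pc.2

-- B's state machine over rest, entered with the flag left by prev, is the
-- adjacent-pairs map
lemma go_eq_zip : ∀ (rest : List Char) (prev : Char),
    get_course_name_go (prev == '.') rest = ((prev :: rest).zip rest).map pvPairF := by
  intro rest
  induction rest with
  | nil => intro prev; simp [get_course_name_go]
  | cons c t ih =>
      intro prev
      simp only [get_course_name_go, List.zip_cons_cons, List.map_cons, ih c, pvPairF]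
      by_cases h : prev = '.' <;> simp [h]

-- pyRange 1 (n+1) as a mapped List.range
lemma pyRange_one_eq (n : Nat) :
    PySem.List.pyRange 1 ((n : Int) + 1) = List.map (fun k : Nat => ((k : Int) + 1)) (List.range n) := by
  induction n with
  | zero => decide
  | succ m ih =>
      have h1 : (1 : Int) ≤ (m : Int) + 1 := by omega
      rw [show ((m + 1 : Nat) : Int) + 1 = ((m : Int) + 1) + 1 by push_cast; ring,
        PySem.List.pyRange_one_succ_right h1, ih, List.range_succ]
      simp

-- the adjacent-pairs map, written over indices into w
lemma range_map_pair (w : List Char) :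
    List.map (fun k : Nat => pvPairF (w.getD k ' ', w.getD (k + 1) ' '))
      (List.range (w.length - 1))
    = (w.zip (w.drop 1)).map pvPairF := by
  induction w with
  | nil => rfl
  | cons c t ih =>
      cases t with
      | nil => rfl
      | cons c2 t2 =>
          have hlen : (c :: c2 :: t2).length - 1 = ((c2 :: t2).length - 1) + 1 := by simp
          rw [hlen, List.range_succ_eq_map, List.map_cons, List.map_map]
          have : List.map ((fun k : Nat => pvPairF ((c :: c2 :: t2).getD k ' ', (c :: c2 :: t2).getD (k + 1) ' ')) ∘ (fun i => i + 1)) (List.range ((c2 :: t2).length - 1))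
              = List.map (fun k : Nat => pvPairF ((c2 :: t2).getD k ' ', (c2 :: t2).getD (k + 1) ' ')) (List.range ((c2 :: t2).length - 1)) := by
            apply List.map_congr_left
            intro k _
            rfl
          rw [this, ih]
          rfl

-- A's inner loop is the same adjacent-pairs map
lemma dotLoop_eq_zip (w : List Char) :
    get_course_name_dotLoop w = (w.zip (w.drop 1)).map pvPairF := by
  unfold get_course_name_dotLoop
  have hbody : ∀ (acc : List Char) (i : Int),
      (if PySem.List.pyGetD w (i - 1) ' ' = '.' then
        acc ++ [PySem.Chars.upperChar (PySem.List.pyGetD w i ' ')]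
      else acc ++ [PySem.Chars.lowerChar (PySem.List.pyGetD w i ' ')])
      = acc ++ [if PySem.List.pyGetD w (i - 1) ' ' = '.' then
          PySem.Chars.upperChar (PySem.List.pyGetD w i ' ')
        else PySem.Chars.lowerChar (PySem.List.pyGetD w i ' ')] := by
    intro acc i; split <;> rfl
  simp only [hbody, PySem.List.foldl_append_singleton_eq_map, List.nil_append]
  cases w with
  | nil => decide
  | cons c t =>
      have hlen : ((c :: t).length : Int) = (t.length : Int) + 1 := by simp
      rw [hlen, pyRange_one_eq, List.map_map, ← range_map_pair (c :: t)]
      apply List.map_congr_left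
      intro k _
      have h0 : (0 : Int) ≤ (k : Int) + 1 - 1 := by omega
      have h1 : (0 : Int) ≤ (k : Int) + 1 := by omega
      simp only [Function.comp_apply, PySem.List.pyGetD_of_nonneg _ _ h0,
        PySem.List.pyGetD_of_nonneg _ _ h1]
      have ht1 : ((k : Int) + 1 - 1).toNat = k := by omega
      have ht2 : ((k : Int) + 1).toNat = k + 1 := by omega
      rw [ht1, ht2]
      simp [pvPairF]

-- B's machine with the flag off and no dot ahead just lowercases
lemma go_no_dot : ∀ (rest : List Char), '.' ∉ rest →
    get_course_name_go false rest = rest.map PySem.Chars.lowerChar := by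
  intro rest
  induction rest with
  | nil => intro _; rfl
  | cons c t ih =>
      intro h
      have hc : c ≠ '.' := fun hc => h (by simp [hc])
      have ht : '.' ∉ t := fun ht => h (by simp [ht])
      have hb : (c == '.') = false := beq_eq_false_iff_ne.mpr hc
      simp [get_course_name_go, hb, ih ht]

-- the per-word pieces of A and B coincide on nonempty words
lemma word_eq {w : List Char} (hw : w ≠ []) :
    (if w = ['A', 'P'] then ['A', 'P']
     else if '.' ∈ w then
       [' '] ++ [PySem.Chars.upperChar (w.headD ' ')] ++ get_course_name_dotLoop w
     else
       [' '] ++ [PySem.Chars.upperChar (w.headD ' ')] ++ PySem.Chars.lower (w.drop 1))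
    = get_course_name_word w := by
  unfold get_course_name_word
  by_cases hap : w = ['A', 'P']
  · simp [hap]
  · cases w with
    | nil => exact absurd rfl hw
    | cons c t =>
      simp only [hap]
      by_cases hdot : '.' ∈ c :: t
      · simp only [if_pos hdot, dotLoop_eq_zip]
        simp only [List.headD_cons, List.drop_succ_cons, List.drop_zero, get_course_name_go,
          if_true, if_false]
        rw [← go_eq_zip t c]
        rfl
      · simp only [if_neg hdot]
        have hc : c ≠ '.' := fun h => hdot (by simp [h])
        have ht : '.' ∉ t := fun h => hdot (by simp [h])
        have hb : (c == '.') = false := beq_eq_false_iff_ne.mpr hc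
        simp only [List.headD_cons, List.drop_succ_cons, List.drop_zero,
          get_course_name_go, hb, if_true, if_false]
        rw [go_no_dot t ht]
        simp [PySem.Chars.lower]

lemma intercalate_nil (l : List (List Char)) : PySem.Chars.join [] l = l.flatten := by
  simp [PySem.Chars.join, List.intercalate]
  induction l with
  | nil => rfl
  | cons x t ih => cases t <;> simp_all [List.intersperse]

-- ===== VERDICT (by name: the statement is the Claim_ definition above) =====
theorem get_course_name_spec : Claim_equal_get_course_name := by
  intro course _ _
  unfold Spec_get_course_name get_course_name get_course_name_alt
  congr 1
  rw [intercalate_nil]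
  rw [PySem.List.foldl_congr_mem
    (PySem.Chars.split₀ ((PySem.Dict.get? (PySem.Dict.mk course) "name").getD "").toList)
    (fun course_name word =>
      if word = ['A', 'P'] then course_name ++ ['A', 'P']
      else if '.' ∈ word then
        course_name ++ [' '] ++ [PySem.Chars.upperChar (word.headD ' ')]
          ++ get_course_name_dotLoop word
      else
        course_name ++ [' '] ++ [PySem.Chars.upperChar (word.headD ' ')]
          ++ PySem.Chars.lower (word.drop 1))
    (fun acc w => acc ++ get_course_name_word w)
    []
    (by
      intro acc w hwmem
      have hw := split₀_ne_nil hwmem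
      beta_reduce
      rw [← word_eq hw]
      split
      · rfl
      · split <;> simp)]
  rw [PySem.List.foldl_append_eq_flatMap, List.flatMap_def]
  rfl
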